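-- pv_equiv track=rewrite | github.com/hyun132/Algorithm_with_python | 피로도.py | dfs
-- ===== SOURCE A (Python) =====
-- def dfs(tiredness, dungeons, visited):
--     if visited == len(dungeons) - 1 or tiredness <= 0: return len(visited)
--     count = len(visited)
--     for i in range(len(dungeons)):
--         if i not in visited:
--             needed, cost = dungeons[i]
--             if needed <= tiredness:
--                 count = max(count, dfs(tiredness - cost, dungeons, visited + [i]))
--     return count
-- ===== SOURCE B (Python) =====
-- def dfs(tiredness, dungeons, visited):
--     free = [i for i in range(len(dungeons)) if i not in visited]
--     frontier = [(tiredness, free)]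
--     depth = 0
--     best = 0
--     while frontier:
--         best = depth
--         nxt = []
--         for t, rem in frontier:
--             if t > 0:
--                 for idx in range(len(rem)):
--                     needed, cost = dungeons[rem[idx]]
--                     if needed <= t:
--                         child = (t - cost, rem[:idx] + rem[idx + 1:])
--                         if child not in nxt:
--                             nxt.append(child)
--         frontier = nxt
--         depth += 1
--     return len(visited) + best
-- ===== Notes on version B (the rewrite author's own statement) =====
-- stated objective: alternative
-- what changed: A's recursive depth-first search over all visit orders is replaced by an iterative level-synchronous BFS over deduplicated (tiredness, remaining-dungeons) states, so a state reachable by many orders is expanded once per level; the answer is len(visited) plus the deepest nonempty level.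
import Mathlib
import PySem

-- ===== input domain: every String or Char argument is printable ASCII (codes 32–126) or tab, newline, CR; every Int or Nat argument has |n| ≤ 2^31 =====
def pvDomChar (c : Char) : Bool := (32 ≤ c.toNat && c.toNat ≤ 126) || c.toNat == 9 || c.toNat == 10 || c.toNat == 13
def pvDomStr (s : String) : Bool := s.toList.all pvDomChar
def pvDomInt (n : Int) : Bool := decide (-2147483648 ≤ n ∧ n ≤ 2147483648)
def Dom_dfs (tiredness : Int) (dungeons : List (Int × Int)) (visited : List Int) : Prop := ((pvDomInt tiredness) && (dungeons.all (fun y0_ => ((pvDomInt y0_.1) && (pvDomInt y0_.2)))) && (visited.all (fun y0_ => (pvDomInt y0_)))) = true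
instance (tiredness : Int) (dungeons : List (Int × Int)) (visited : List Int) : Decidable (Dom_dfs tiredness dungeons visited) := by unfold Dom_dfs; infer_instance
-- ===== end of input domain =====

-- B replaces A's recursive depth-first search over visit orders by a level-synchronous
-- breadth-first search over DEDUPLICATED (tiredness, remaining-dungeons) states, so equal states
-- reached through different visit orders are expanded once per level (objective: alternative).

-- ===== PORT A =====
-- the list of indices of dungeons still available from `visited` (also B's `free` and the A-side termination measure)
def freeOf (dungeons : List (Int × Int)) (visited : List Int) : List Int :=
  ((List.range dungeons.length).map (fun (j : Nat) => (j : Int))).filter (fun i => decide (i ∉ visited))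

def dfsMeasure (dungeons : List (Int × Int)) (visited : List Int) : Nat :=
  (freeOf dungeons visited).length

-- termination lemma for the mutual recursion below (cited by decreasing_by)
theorem dfsMeasure_append_lt (dungeons : List (Int × Int)) (visited : List Int) (j : Nat)
    (hj : j < dungeons.length) (hv : (j : Int) ∉ visited) :
    dfsMeasure dungeons (visited ++ [(j : Int)]) < dfsMeasure dungeons visited := by
  have hsplit : freeOf dungeons (visited ++ [(j : Int)])
      = (freeOf dungeons visited).filter (fun i => decide (i ≠ (j : Int))) := by
    unfold freeOf
    rw [List.filter_filter]
    apply List.filter_congr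
    intro x _
    simp [List.mem_append, not_or, Bool.and_comm]
  have hmem : (j : Int) ∈ freeOf dungeons visited := by
    unfold freeOf
    simp [hv, hj]
  unfold dfsMeasure
  rw [hsplit]
  apply List.length_filter_lt_length_iff_exists.mpr
  exact ⟨(j : Int), hmem, by simp⟩

mutual
-- literal port of A; Python's 'visited == len(dungeons) - 1' compares a LIST with an int and is
-- always False, so only the 'tiredness <= 0' test remains
def dfs (tiredness : Int) (dungeons : List (Int × Int)) (visited : List Int) : Int :=
  if tiredness ≤ 0 then (visited.length : Int)
  else dfsLoop tiredness dungeons visited (List.finRange dungeons.length) (visited.length : Int)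
termination_by (dfsMeasure dungeons visited, dungeons.length + 1)

-- 'for i in range(len(dungeons)):' — i ranges over valid indices, hence List.finRange
def dfsLoop (tiredness : Int) (dungeons : List (Int × Int)) (visited : List Int)
    (is : List (Fin dungeons.length)) (count : Int) : Int :=
  match is with
  | [] => count
  | i :: rest =>
    if h : ((i : Nat) : Int) ∉ visited then
      let nc := dungeons.get i
      if nc.1 ≤ tiredness then
        dfsLoop tiredness dungeons visited rest
          (max count (dfs (tiredness - nc.2) dungeons (visited ++ [((i : Nat) : Int)])))
      else dfsLoop tiredness dungeons visited rest count
    else dfsLoop tiredness dungeons visited rest count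
termination_by (dfsMeasure dungeons visited, is.length)
decreasing_by
  · exact Prod.Lex.left _ _ (dfsMeasure_append_lt _ _ _ i.isLt h)
  · apply Prod.Lex.right; simp
  · apply Prod.Lex.right; simp
  · apply Prod.Lex.right; simp
end

-- ===== PORT B =====
-- 'dungeons[rem[idx]]' for an Int index; in B the index is always a valid dungeon index, so the
-- default is never reached (PySem.List.pyGet? is exact Python indexing)
def ixB (dungeons : List (Int × Int)) (i : Int) : Int × Int :=
  (PySem.List.pyGet? dungeons i).getD (0, 0)

-- body of B's inner 'for idx in range(len(rem)):' loop (t, rem are the current state)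
def innerB (dungeons : List (Int × Int)) (t : Int) (rem : List Int)
    (nxt : List (Int × List Int)) (idx : Nat) : List (Int × List Int) :=
  let nc := ixB dungeons (rem.getD idx 0)
  if nc.1 ≤ t then
    let child : Int × List Int := (t - nc.2, rem.take idx ++ rem.drop (idx + 1))
    if child ∈ nxt then nxt else nxt ++ [child]
  else nxt

-- body of B's while loop: expand every frontier state, deduplicating children
def stepB (dungeons : List (Int × Int)) (frontier : List (Int × List Int)) : List (Int × List Int) :=
  frontier.foldl (fun nxt s =>
    if 0 < s.1 then (List.range s.2.length).foldl (innerB dungeons s.1 s.2) nxt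
    else nxt) []

-- B's 'while frontier:' loop; the fuel argument is only a termination bound (every child state's
-- remaining list is one shorter than its parent's, so free.length + 2 rounds always suffice)
def bfsB (dungeons : List (Int × Int)) : Nat → Int → Int → List (Int × List Int) → Int
  | 0, _, best, _ => best
  | fuel + 1, depth, best, frontier =>
    if frontier = [] then best
    else bfsB dungeons fuel (depth + 1) depth (stepB dungeons frontier)

def dfs_alt (tiredness : Int) (dungeons : List (Int × Int)) (visited : List Int) : Int :=
  let free := freeOf dungeons visited
  (visited.length : Int) + bfsB dungeons (free.length + 2) 0 0 [(tiredness, free)]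

-- ===== PRECONDITION & SPEC =====
def Spec_dfs (tiredness : Int) (dungeons : List (Int × Int)) (visited : List Int) (out : Int) : Prop := out = dfs_alt tiredness dungeons visited
instance (tiredness : Int) (dungeons : List (Int × Int)) (visited : List Int) (out : Int) : Decidable (Spec_dfs tiredness dungeons visited out) := by unfold Spec_dfs; infer_instance

-- ===== CLAIM (what is proved, stated in full; the proofs are below) =====
def Claim_equal_dfs : Prop := ∀ (tiredness : Int) (dungeons : List (Int × Int)) (visited : List Int), Dom_dfs tiredness dungeons visited → Spec_dfs tiredness dungeons visited (dfs tiredness dungeons visited)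

-- ===== LEMMAS AND PROOFS =====

-- max of a list of Ints, at least 0
def listMaxI (l : List Int) : Int := l.foldr max 0

-- children of a state (t, rem): one child per affordable dungeon of rem, tracked as prefix/suffix
def childVals (d : List (Int × Int)) (t : Int) : List Int → List Int → List (Int × List Int)
  | _, [] => []
  | pre, i :: suf =>
    (if 0 < t ∧ (ixB d i).1 ≤ t then [(t - (ixB d i).2, pre ++ suf)] else [])
      ++ childVals d t (pre ++ [i]) suf

-- the common specification: the best number of further visits from state s (fuelled, then fixed)
def Gk (d : List (Int × Int)) : Nat → Int × List Int → Int
  | 0, _ => 0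
  | k + 1, s => listMaxI ((childVals d s.1 [] s.2).map (fun c => 1 + Gk d k c))

def Gfun (d : List (Int × Int)) (s : Int × List Int) : Int := Gk d s.2.length s

theorem listMaxI_nonneg (l : List Int) : 0 ≤ listMaxI l := by
  induction l with
  | nil => simp [listMaxI]
  | cons a l ih => simp only [listMaxI, List.foldr_cons] at *; exact le_max_of_le_right ih

theorem le_listMaxI_of_mem {l : List Int} {x : Int} (h : x ∈ l) : x ≤ listMaxI l := by
  induction l with
  | nil => simp at h
  | cons a l ih =>
    simp only [listMaxI, List.foldr_cons] at *
    rcases List.mem_cons.mp h with h | h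
    · exact h ▸ le_max_left _ _
    · exact le_max_of_le_right (ih h)

theorem listMaxI_le {l : List Int} {b : Int} (hb : 0 ≤ b) (h : ∀ x ∈ l, x ≤ b) : listMaxI l ≤ b := by
  induction l with
  | nil => simpa [listMaxI]
  | cons a l ih =>
    simp only [listMaxI, List.foldr_cons] at *
    exact max_le (h a (by simp)) (ih (fun x hx => h x (by simp [hx])))

theorem listMaxI_cases (l : List Int) : listMaxI l = 0 ∨ listMaxI l ∈ l := by
  induction l with
  | nil => simp [listMaxI]
  | cons a l ih =>
    simp only [listMaxI, List.foldr_cons] at *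
    rcases le_total a (List.foldr max 0 l) with hle | hle
    · rw [max_eq_right hle]
      rcases ih with h | h
      · exact Or.inl h
      · exact Or.inr (List.mem_cons_of_mem _ h)
    · rw [max_eq_left hle]
      exact Or.inr (List.mem_cons_self ..)

theorem childVals_nonpos (d : List (Int × Int)) (t : Int) (ht : t ≤ 0) :
    ∀ suf pre, childVals d t pre suf = [] := by
  intro suf
  induction suf with
  | nil => intro pre; rfl
  | cons i suf ih =>
    intro pre
    simp only [childVals, ih]
    rw [if_neg (by omega)]
    rfl

theorem childVals_length (d : List (Int × Int)) (t : Int) :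
    ∀ suf pre c, c ∈ childVals d t pre suf → c.2.length + 1 = pre.length + suf.length := by
  intro suf
  induction suf with
  | nil => intro pre c hc; simp [childVals] at hc
  | cons i suf ih =>
    intro pre c hc
    simp only [childVals, List.mem_append] at hc
    rcases hc with hc | hc
    · split at hc
      · simp only [List.mem_singleton] at hc
        subst hc
        simp [List.length_append]
        omega
      · simp at hc
    · have := ih (pre ++ [i]) c hc
      simp [List.length_append] at *
      omega

theorem Gfun_eq (d : List (Int × Int)) (s : Int × List Int) :
    Gfun d s = listMaxI ((childVals d s.1 [] s.2).map (fun c => 1 + Gfun d c)) := by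
  unfold Gfun
  rcases h : s.2.length with _ | k
  · have : s.2 = [] := List.length_eq_zero_iff.mp h
    rw [this]
    simp [Gk, childVals, listMaxI]
  · rw [Gk]
    congr 1
    apply List.map_congr_left
    intro c hc
    have hlen := childVals_length d s.1 s.2 [] c hc
    have : c.2.length = k := by simp at hlen; omega
    rw [this]

theorem Gfun_nonneg (d : List (Int × Int)) (s : Int × List Int) : 0 ≤ Gfun d s := by
  rw [Gfun_eq]
  exact listMaxI_nonneg _

theorem listMaxI_cons (x : Int) (l : List Int) : listMaxI (x :: l) = max x (listMaxI l) := rfl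

theorem mem_dedup_append {x c : Int × List Int} {nxt : List (Int × List Int)} :
    (x ∈ if c ∈ nxt then nxt else nxt ++ [c]) ↔ x ∈ nxt ∨ x = c := by
  by_cases h : c ∈ nxt
  · simp only [if_pos h]
    exact ⟨Or.inl, fun hx => hx.elim id (fun e => e ▸ h)⟩
  · simp [if_neg h, List.mem_append]

theorem mem_innerFold (d : List (Int × Int)) (t : Int) (rem : List Int) (ht : 0 < t) :
    ∀ (suf pre : List Int) (acc : List (Int × List Int)) (x : Int × List Int),
      rem = pre ++ suf →
      (x ∈ (List.range' pre.length suf.length).foldl (innerB d t rem) acc ↔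
        x ∈ acc ∨ x ∈ childVals d t pre suf) := by
  intro suf
  induction suf with
  | nil => intro pre acc x h; simp [childVals]
  | cons i suf ih =>
    intro pre acc x h
    rw [show (i :: suf).length = suf.length + 1 from rfl, List.range'_succ, List.foldl_cons]
    have hget : rem.getD pre.length 0 = i := by
      rw [h, List.getD_eq_getElem?_getD, List.getElem?_append_right (le_refl pre.length)]
      simp
    have htake : rem.take pre.length = pre := by rw [h]; exact List.take_left
    have hdrop : rem.drop (pre.length + 1) = suf := by
      have : rem = (pre ++ [i]) ++ suf := by simp [h]
      rw [this]
      have hl : pre.length + 1 = (pre ++ [i]).length := by simp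
      rw [hl]; exact List.drop_left
    have hassoc : rem = (pre ++ [i]) ++ suf := by simp [h]
    have hlen : pre.length + 1 = (pre ++ [i]).length := by simp
    simp only [innerB, hget, htake, hdrop]
    by_cases hc : (ixB d i).1 ≤ t
    · rw [if_pos hc]
      rw [hlen]
      rw [ih (pre ++ [i]) _ x hassoc]
      rw [mem_dedup_append]
      simp only [childVals, if_pos (And.intro ht hc), List.mem_append, List.mem_singleton]
      tauto
    · rw [if_neg hc]
      rw [hlen]
      rw [ih (pre ++ [i]) _ x hassoc]
      simp only [childVals, if_neg (by tauto : ¬ (0 < t ∧ (ixB d i).1 ≤ t)), List.nil_append]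

theorem mem_stepB (d : List (Int × Int)) (frontier : List (Int × List Int))
    (x : Int × List Int) :
    x ∈ stepB d frontier ↔ ∃ s ∈ frontier, x ∈ childVals d s.1 [] s.2 := by
  have key : ∀ (fr : List (Int × List Int)) (acc : List (Int × List Int)),
      (x ∈ fr.foldl (fun nxt s =>
          if 0 < s.1 then (List.range s.2.length).foldl (innerB d s.1 s.2) nxt else nxt) acc ↔
        x ∈ acc ∨ ∃ s ∈ fr, x ∈ childVals d s.1 [] s.2) := by
    intro fr
    induction fr with
    | nil => intro acc; simp
    | cons s fr ih =>
      intro acc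
      rw [List.foldl_cons]
      by_cases hs : 0 < s.1
      · rw [if_pos hs, ih]
        rw [show (List.range s.2.length) = List.range' 0 s.2.length from List.range_eq_range']
        rw [show (0 : Nat) = ([] : List Int).length from rfl]
        rw [mem_innerFold d s.1 s.2 hs s.2 [] acc x (by simp)]
        simp only [List.mem_cons]
        constructor
        · rintro ((h | h) | ⟨s', hs', hx⟩)
          · exact Or.inl h
          · exact Or.inr ⟨s, Or.inl rfl, h⟩
          · exact Or.inr ⟨s', Or.inr hs', hx⟩
        · rintro (h | ⟨s', rfl | hs', hx⟩)
          · exact Or.inl (Or.inl h)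
          · exact Or.inl (Or.inr hx)
          · exact Or.inr ⟨s', hs', hx⟩
      · rw [if_neg hs, ih]
        have hnil : childVals d s.1 [] s.2 = [] := childVals_nonpos d s.1 (by omega) s.2 []
        simp only [List.mem_cons]
        constructor
        · rintro (h | ⟨s', hs', hx⟩)
          · exact Or.inl h
          · exact Or.inr ⟨s', Or.inr hs', hx⟩
        · rintro (h | ⟨s', rfl | hs', hx⟩)
          · exact Or.inl h
          · rw [hnil] at hx; simp at hx
          · exact Or.inr ⟨s', hs', hx⟩
  rw [stepB, key]
  simp

-- the best over a whole frontier
def Hmax (d : List (Int × Int)) (frontier : List (Int × List Int)) : Int :=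
  listMaxI (frontier.map (fun s => Gfun d s))

theorem Hmax_nonneg (d : List (Int × Int)) (frontier : List (Int × List Int)) :
    0 ≤ Hmax d frontier := listMaxI_nonneg _

theorem Hmax_of_step_nil (d : List (Int × Int)) (frontier : List (Int × List Int))
    (h : stepB d frontier = []) : Hmax d frontier = 0 := by
  apply le_antisymm _ (Hmax_nonneg d frontier)
  apply listMaxI_le le_rfl
  intro x hx
  rcases List.mem_map.mp hx with ⟨s, hs, rfl⟩
  have hnil : childVals d s.1 [] s.2 = [] := by
    rw [List.eq_nil_iff_forall_not_mem]
    intro c hc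
    have : c ∈ stepB d frontier := (mem_stepB d frontier c).mpr ⟨s, hs, hc⟩
    rw [h] at this; simp at this
  rw [Gfun_eq, hnil]
  simp [listMaxI]

theorem Hmax_step (d : List (Int × Int)) (frontier : List (Int × List Int))
    (h : stepB d frontier ≠ []) : Hmax d frontier = 1 + Hmax d (stepB d frontier) := by
  have hstepnn := Hmax_nonneg d (stepB d frontier)
  apply le_antisymm
  · apply listMaxI_le (by omega)
    intro x hx
    rcases List.mem_map.mp hx with ⟨s, hs, rfl⟩
    rw [Gfun_eq]
    apply listMaxI_le (by omega)
    intro y hy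
    rcases List.mem_map.mp hy with ⟨c, hc, rfl⟩
    have hcs : c ∈ stepB d frontier := (mem_stepB d frontier c).mpr ⟨s, hs, hc⟩
    have : Gfun d c ≤ Hmax d (stepB d frontier) :=
      le_listMaxI_of_mem (List.mem_map.mpr ⟨c, hcs, rfl⟩)
    omega
  · have step1 : ∀ c ∈ stepB d frontier, 1 + Gfun d c ≤ Hmax d frontier := by
      intro c hc
      rcases (mem_stepB d frontier c).mp hc with ⟨s, hs, hcs⟩
      have h1 : 1 + Gfun d c ≤ Gfun d s := by
        conv_rhs => rw [Gfun_eq]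
        exact le_listMaxI_of_mem (List.mem_map.mpr ⟨c, hcs, rfl⟩)
      have h2 : Gfun d s ≤ Hmax d frontier :=
        le_listMaxI_of_mem (List.mem_map.mpr ⟨s, hs, rfl⟩)
      omega
    rcases listMaxI_cases ((stepB d frontier).map (fun s => Gfun d s)) with h0 | hmem
    · rcases List.exists_mem_of_ne_nil _ h with ⟨c0, hc0⟩
      have e : Hmax d (stepB d frontier) = 0 := h0
      have := step1 c0 hc0
      have := Gfun_nonneg d c0
      omega
    · rcases List.mem_map.mp hmem with ⟨c, hc, hval⟩
      have e : Hmax d (stepB d frontier) = Gfun d c := hval.symm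
      have := step1 c hc
      omega

theorem bfsB_nil (d : List (Int × Int)) (fuel : Nat) (depth best : Int) :
    bfsB d fuel depth best [] = best := by
  cases fuel <;> simp [bfsB]

theorem bfs_eq (d : List (Int × Int)) :
    ∀ (fuel : Nat) (frontier : List (Int × List Int)) (depth best : Int),
      frontier ≠ [] → (∀ s ∈ frontier, s.2.length + 1 ≤ fuel) →
      bfsB d fuel depth best frontier = depth + Hmax d frontier := by
  intro fuel
  induction fuel with
  | zero =>
    intro frontier depth best hne hlen
    rcases List.exists_mem_of_ne_nil _ hne with ⟨s, hs⟩
    exact absurd (hlen s hs) (by omega)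
  | succ fuel ih =>
    intro frontier depth best hne hlen
    rw [bfsB, if_neg hne]
    by_cases hstep : stepB d frontier = []
    · rw [hstep, bfsB_nil, Hmax_of_step_nil d frontier hstep]
      omega
    · rw [ih (stepB d frontier) (depth + 1) depth hstep ?hfuel]
      · rw [Hmax_step d frontier hstep]; omega
      case hfuel =>
        intro c hc
        rcases (mem_stepB d frontier c).mp hc with ⟨s, hs, hcs⟩
        have h1 := childVals_length d s.1 s.2 [] c hcs
        have h2 := hlen s hs
        simp at h1
        omega

theorem B_eq (tiredness : Int) (d : List (Int × Int)) (v : List Int) :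
    dfs_alt tiredness d v = (v.length : Int) + Gfun d (tiredness, freeOf d v) := by
  show (v.length : Int) + bfsB d ((freeOf d v).length + 2) 0 0 [(tiredness, freeOf d v)] =
    (v.length : Int) + Gfun d (tiredness, freeOf d v)
  rw [bfs_eq d ((freeOf d v).length + 2) [(tiredness, freeOf d v)] 0 0 (by simp)
      (by intro s hs; simp at hs; subst hs; simp)]
  have : Hmax d [(tiredness, freeOf d v)] = Gfun d (tiredness, freeOf d v) := by
    unfold Hmax
    simp only [List.map_cons, List.map_nil, listMaxI_cons]
    have := Gfun_nonneg d (tiredness, freeOf d v)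
    simp [listMaxI]
    omega
  rw [this]
  omega

-- ===== A-side lemmas =====

theorem freeOf_nodup (d : List (Int × Int)) (v : List Int) : (freeOf d v).Nodup := by
  unfold freeOf
  exact List.Nodup.filter _
    (List.Nodup.map (fun a b hab => by exact_mod_cast hab) List.nodup_range)

theorem freeOf_append (d : List (Int × Int)) (v : List Int) (x : Int) (pre suf : List Int)
    (h : freeOf d v = pre ++ x :: suf) : freeOf d (v ++ [x]) = pre ++ suf := by
  have hnd : (freeOf d v).Nodup := freeOf_nodup d v
  rw [h] at hnd
  rcases List.nodup_append.mp hnd with ⟨hpre, hxs, hdisj⟩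
  have hxpre : ∀ a ∈ pre, a ≠ x := fun a ha => hdisj a ha x (by simp)
  have hxsuf : x ∉ suf := by
    intro hx
    exact (List.nodup_cons.mp hxs).1 hx
  have hsplit : freeOf d (v ++ [x]) = (freeOf d v).filter (fun i => decide (i ≠ x)) := by
    unfold freeOf
    rw [List.filter_filter]
    apply List.filter_congr
    intro y _
    simp [List.mem_append, not_or, Bool.and_comm]
  rw [hsplit, h, List.filter_append, List.filter_cons]
  rw [if_neg (by simp)]
  rw [List.filter_eq_self.mpr (fun a ha => by simp [hxpre a ha])]
  rw [List.filter_eq_self.mpr (fun a ha => by simp; intro he; exact hxsuf (he ▸ ha))]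

theorem finRange_cast (n : Nat) :
    (List.finRange n).map (fun j => (j.val : Int)) = (List.range n).map (fun (k : Nat) => (k : Int)) := by
  apply List.ext_getElem (by simp)
  intro i h1 h2
  simp

theorem ixB_natCast (d : List (Int × Int)) (n : Nat) (h : n < d.length) :
    ixB d ((n : Nat) : Int) = d[n] := by
  unfold ixB
  rw [PySem.List.pyGet?_natCast]
  simp [List.getElem?_eq_getElem h]

theorem foldl_max_shift (f : Int × List Int → Int) (hf : ∀ c, 0 ≤ f c) (a : Int) :
    ∀ (l : List (Int × List Int)) (b : Int), a ≤ b →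
      l.foldl (fun acc c => max acc (a + f c)) b = max b (a + listMaxI (l.map f)) := by
  intro l
  induction l with
  | nil =>
    intro b hb
    simp [listMaxI]
    omega
  | cons c l ih =>
    intro b hb
    rw [List.foldl_cons, ih (max b (a + f c)) (le_max_of_le_left hb)]
    rw [List.map_cons, listMaxI_cons]
    have h1 := hf c
    have h2 := listMaxI_nonneg (l.map f)
    simp only [Int.max_def]
    split_ifs <;> omega

theorem loop_eq (d : List (Int × Int)) (t : Int) (v : List Int) (ht : ¬ t ≤ 0)
    (IH : ∀ (v' : List Int) (t' : Int), dfsMeasure d v' < dfsMeasure d v →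
        dfs t' d v' = (v'.length : Int) + Gfun d (t', freeOf d v')) :
    ∀ (js : List (Fin d.length)) (pre : List Int) (count : Int),
      pre ++ (js.map (fun j => (j.val : Int))).filter (fun i => decide (i ∉ v)) = freeOf d v →
      dfsLoop t d v js count =
        (childVals d t pre ((js.map (fun j => (j.val : Int))).filter (fun i => decide (i ∉ v)))).foldl
          (fun acc c => max acc ((v.length : Int) + (1 + Gfun d c))) count := by
  intro js
  induction js with
  | nil =>
    intro pre count h
    simp only [List.map_nil, List.filter_nil, childVals, List.foldl_nil]
    simp [dfsLoop]
  | cons j rest ihj =>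
    intro pre count h
    simp only [List.map_cons] at h ⊢
    by_cases h1 : (j.val : Int) ∉ v
    · rw [List.filter_cons, if_pos (by simpa using h1)] at h ⊢
      have hfree : freeOf d v = pre ++ (j.val : Int) ::
          (rest.map (fun j => (j.val : Int))).filter (fun i => decide (i ∉ v)) := h.symm
      have hrec : freeOf d (v ++ [(j.val : Int)]) = pre ++
          (rest.map (fun j => (j.val : Int))).filter (fun i => decide (i ∉ v)) :=
        freeOf_append d v _ pre _ hfree
      have hpre' : (pre ++ [(j.val : Int)]) ++
          (rest.map (fun j => (j.val : Int))).filter (fun i => decide (i ∉ v)) = freeOf d v := by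
        rw [List.append_assoc, List.singleton_append]
        exact h
      have hix : ixB d (j.val : Int) = d.get j := by
        rw [ixB_natCast d (j : Nat) j.isLt]
        simp
      rw [dfsLoop]
      simp only [dif_pos h1]
      by_cases h2 : (d.get j).1 ≤ t
      · rw [if_pos h2]
        have hmeas : dfsMeasure d (v ++ [(j.val : Int)]) < dfsMeasure d v :=
          dfsMeasure_append_lt d v (j : Nat) j.isLt h1
        have hdfs : dfs (t - (d.get j).2) d (v ++ [(j.val : Int)]) =
            ((v.length : Int) + (1 + Gfun d (t - (d.get j).2, pre ++
              (rest.map (fun j => (j.val : Int))).filter (fun i => decide (i ∉ v))))) := by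
          rw [IH _ _ hmeas, hrec]
          simp only [List.length_append, List.length_cons, List.length_nil]
          push_cast
          ring
        rw [hdfs]
        simp only [childVals, hix]
        rw [if_pos (show 0 < t ∧ (d.get j).1 ≤ t from ⟨by omega, h2⟩)]
        rw [List.singleton_append, List.foldl_cons]
        exact ihj (pre ++ [(j.val : Int)]) _ hpre'
      · rw [if_neg h2]
        simp only [childVals, hix]
        rw [if_neg (by tauto : ¬ (0 < t ∧ (d.get j).1 ≤ t)), List.nil_append]
        exact ihj (pre ++ [(j.val : Int)]) _ hpre'
    · rw [List.filter_cons, if_neg (by simpa using h1)] at h ⊢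
      rw [dfsLoop]
      simp only [dif_neg h1]
      exact ihj pre _ h

theorem A_eq (d : List (Int × Int)) : ∀ (v : List Int) (t : Int),
    dfs t d v = (v.length : Int) + Gfun d (t, freeOf d v) := by
  suffices key : ∀ (μ : Nat) (v : List Int) (t : Int), dfsMeasure d v = μ →
      dfs t d v = (v.length : Int) + Gfun d (t, freeOf d v) from
    fun v t => key (dfsMeasure d v) v t rfl
  intro μ
  induction μ using Nat.strong_induction_on with
  | _ μ IHμ =>
    intro v t hμ
    rw [dfs]
    by_cases ht : t ≤ 0
    · rw [if_pos ht]
      rw [Gfun_eq]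
      simp only [childVals_nonpos d t ht, List.map_nil]
      simp [listMaxI]
    · rw [if_neg ht]
      have IH : ∀ (v' : List Int) (t' : Int), dfsMeasure d v' < dfsMeasure d v →
          dfs t' d v' = (v'.length : Int) + Gfun d (t', freeOf d v') := by
        intro v' t' hlt
        exact IHμ (dfsMeasure d v') (hμ ▸ hlt) v' t' rfl
      have hpre : ([] : List Int) ++
          ((List.finRange d.length).map (fun j => (j.val : Int))).filter
            (fun i => decide (i ∉ v)) = freeOf d v := by
        rw [List.nil_append, finRange_cast]
        rfl
      rw [loop_eq d t v ht IH (List.finRange d.length) [] (v.length : Int) hpre]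
      have hfilter : ((List.finRange d.length).map (fun j => (j.val : Int))).filter
          (fun i => decide (i ∉ v)) = freeOf d v := by
        rw [← hpre, List.nil_append]
      rw [hfilter]
      rw [foldl_max_shift (fun c => 1 + Gfun d c)
        (fun c => by show (0:Int) ≤ 1 + Gfun d c; have := Gfun_nonneg d c; omega) (v.length : Int) _ (v.length : Int) le_rfl]
      rw [Gfun_eq]
      have hM := listMaxI_nonneg ((childVals d t [] (freeOf d v)).map (fun c => 1 + Gfun d c))
      rw [max_eq_right (by linarith)]

-- ===== VERDICT (by name: the statement is the Claim_ definition above) =====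
theorem dfs_spec : Claim_equal_dfs := by
  unfold Claim_equal_dfs
  intro tiredness dungeons visited _
  unfold Spec_dfs
  rw [A_eq dungeons visited tiredness, B_eq tiredness dungeons visited]
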